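-- pv_equiv track=rewrite | github.com/srav-athina/Propositional-Premise-Verifier | logic.py | build_truth_table
-- ===== SOURCE A (Python) =====
-- import itertools
--
-- def build_truth_table(models):
--     booleans = [[] for i in range(len(models))]
--     for row in itertools.product([False,True], repeat=len(models)):
--         for i in range(len(row)):
--             booleans[i].append(row[i])
--     truth_table = {}
--     for model, column in zip(models, booleans):
--         truth_table[model] = column
--     return truth_table
-- ===== SOURCE B (Python) =====
-- def build_truth_table(models):
--     n = len(models)
--     table = {}
--     for i in range(n):
--         table[models[i]] = [(r >> (n - 1 - i)) & 1 == 1 for r in range(2 ** n)]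
--     return table
-- ===== Notes on version B (the rewrite author's own statement) =====
-- stated objective: simpler
-- what changed: B computes each variable's column directly from the bit pattern of the row index ((r >> (n-1-i)) & 1) over range(2**n), instead of enumerating all rows with itertools.product and transposing them column-by-column.
import Mathlib
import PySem

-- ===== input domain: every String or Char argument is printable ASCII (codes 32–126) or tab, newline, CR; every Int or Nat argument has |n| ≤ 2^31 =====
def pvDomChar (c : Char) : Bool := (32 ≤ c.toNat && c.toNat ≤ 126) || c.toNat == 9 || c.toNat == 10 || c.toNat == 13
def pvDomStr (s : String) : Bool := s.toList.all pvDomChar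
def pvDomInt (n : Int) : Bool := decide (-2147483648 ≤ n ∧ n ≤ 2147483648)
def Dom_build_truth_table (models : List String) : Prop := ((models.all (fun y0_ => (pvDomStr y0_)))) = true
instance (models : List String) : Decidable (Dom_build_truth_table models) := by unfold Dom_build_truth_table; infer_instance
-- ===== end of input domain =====

-- B computes each truth-table column directly from the bit pattern of the row index
-- (one arithmetic formula per entry) instead of enumerating all rows with
-- itertools.product and transposing; alternative decomposition, same exponential cost.

-- ===== PORT A =====
-- itertools.product([False, True], repeat=n): first coordinate varies slowest.
def pvProdFT : Nat → List (List Bool)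
  | 0 => [[]]
  | n + 1 => (pvProdFT n).map (false :: ·) ++ (pvProdFT n).map (true :: ·)

-- A: build n empty columns, append row[i] to booleans[i] for every row, then fill a dict.
-- All indices are in range, so List.getD/set are exact for Python's booleans[i] / row[i].
def build_truth_table (models : List String) : List (String × List Bool) :=
  let n := models.length
  let booleans := (pvProdFT n).foldl
    (fun bs row => (List.range row.length).foldl
      (fun bs i => bs.set i ((bs.getD i []) ++ [row.getD i false])) bs)
    (List.replicate n [])
  let truth_table := (models.zip booleans).foldl
    (fun d p => d.insert p.1 p.2) (PySem.Dict.empty (κ := String) (ν := List Bool))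
  truth_table.items

-- ===== PORT B =====
-- B: table[models[i]] = [(r >> (n-1-i)) & 1 == 1 for r in range(2**n)].
-- range(n) / range(2**n) have nonnegative bounds, so List.range over Nat is exact;
-- models[i] with i < n is exact as models.getD i "".
def build_truth_table_alt (models : List String) : List (String × List Bool) :=
  let n := models.length
  let table := (List.range n).foldl
    (fun d i => d.insert (models.getD i "")
      ((List.range (2 ^ n)).map (fun r => ((r >>> (n - 1 - i)) &&& 1) == 1)))
    (PySem.Dict.empty (κ := String) (ν := List Bool))
  table.items

-- ===== PRECONDITION & SPEC =====
def Spec_build_truth_table (models : List String) (out : List (String × List Bool)) : Prop := out = build_truth_table_alt models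
instance (models : List String) (out : List (String × List Bool)) : Decidable (Spec_build_truth_table models out) := by unfold Spec_build_truth_table; infer_instance

-- ===== CLAIM (what is proved, stated in full; the proofs are below) =====
def Claim_equal_build_truth_table : Prop := ∀ (models : List String), Dom_build_truth_table models → Spec_build_truth_table models (build_truth_table models)

-- ===== LEMMAS AND PROOFS =====

theorem pvProdFT_length (n : Nat) : (pvProdFT n).length = 2 ^ n := by
  induction n with
  | zero => rfl
  | succ n ih => simp [pvProdFT, ih, pow_succ]; ring

theorem pvProdFT_row_length (n : Nat) : ∀ row ∈ pvProdFT n, row.length = n := by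
  induction n with
  | zero => simp [pvProdFT]
  | succ n ih =>
    intro row hrow
    simp only [pvProdFT, List.mem_append, List.mem_map] at hrow
    rcases hrow with ⟨r, hr, rfl⟩ | ⟨r, hr, rfl⟩ <;> simp [ih r hr]

-- the inner Python loop: for i in range(len(row)): booleans[i].append(row[i])
def pvInner (row : List Bool) (bs : List (List Bool)) (n : Nat) : List (List Bool) :=
  (List.range n).foldl (fun bs i => bs.set i ((bs.getD i []) ++ [row.getD i false])) bs

theorem pvInner_length (row : List Bool) (bs : List (List Bool)) (n : Nat) :
    (pvInner row bs n).length = bs.length := by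
  induction n with
  | zero => rfl
  | succ n ih =>
    simp only [pvInner, List.range_succ, List.foldl_append, List.foldl_cons, List.foldl_nil]
    simpa [pvInner] using ih

theorem pvInner_getElem? (row : List Bool) (bs : List (List Bool)) (n : Nat) (j : Nat) :
    (pvInner row bs n)[j]? =
      if j < n then bs[j]?.map (· ++ [row.getD j false]) else bs[j]? := by
  induction n generalizing j with
  | zero => simp [pvInner]
  | succ n ih =>
    simp only [pvInner, List.range_succ, List.foldl_append, List.foldl_cons, List.foldl_nil]
    have hlen : (pvInner row bs n).length = bs.length := pvInner_length row bs n
    have hgd : (pvInner row bs n).getD n [] = bs.getD n [] := by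
      simp [List.getD_eq_getElem?_getD, ih n]
    rw [show ((List.range n).foldl
        (fun bs i => bs.set i ((bs.getD i []) ++ [row.getD i false])) bs) = pvInner row bs n from rfl,
      hgd, List.getElem?_set]
    by_cases hjn : j = n
    · subst hjn
      by_cases hjl : j < bs.length
      · simp [hjl, hlen, List.getD_eq_getElem?_getD]
      · simp [hjl, hlen, ih]
    · rw [if_neg (Ne.symm hjn), ih j]
      rcases Nat.lt_or_ge j n with h | h
      · simp [h, Nat.lt_succ_of_lt h]
      · have h1 : ¬ j < n := not_lt.mpr h
        have h2 : ¬ j < n + 1 := by omega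
        simp [h1, h2]

-- the outer fold preserves the number of columns
theorem pvOuter_length (rows : List (List Bool)) : ∀ (bs : List (List Bool)),
    (rows.foldl (fun bs row => pvInner row bs row.length) bs).length = bs.length := by
  induction rows with
  | nil => intro bs; rfl
  | cons row rest ih => intro bs; simp only [List.foldl_cons]; rw [ih, pvInner_length]

-- the outer Python loop over all rows
theorem pvOuter_getElem? (rows : List (List Bool)) (m : Nat)
    (hrows : ∀ row ∈ rows, row.length = m) :
    ∀ (bs : List (List Bool)), bs.length = m → ∀ j, j < m →
      (rows.foldl (fun bs row => pvInner row bs row.length) bs)[j]? =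
        bs[j]?.map (· ++ rows.map (fun row => row.getD j false)) := by
  induction rows with
  | nil =>
    intro bs _ j hj
    cases h : bs[j]? <;> simp [h]
  | cons row rest ih =>
    intro bs hbs j hj
    have hrl : row.length = m := hrows row (List.mem_cons_self ..)
    simp only [List.foldl_cons]
    rw [ih (fun r hr => hrows r (List.mem_cons_of_mem _ hr))
        _ (by rw [pvInner_length, hbs]) j hj]
    rw [pvInner_getElem?]
    have : j < row.length := by omega
    simp [this, Option.map_map, Function.comp_def]

-- A's transposed column j equals B's bit-pattern column j
theorem pvCol_eq (n : Nat) : ∀ i < n,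
    (pvProdFT n).map (fun row => row.getD i false) =
      (List.range (2 ^ n)).map (fun r => ((r >>> (n - 1 - i)) &&& 1) == 1) := by
  induction n with
  | zero => intro i hi; omega
  | succ n ih =>
    intro i hi
    have hsplit : List.range (2 ^ (n + 1)) =
        List.range (2 ^ n) ++ (List.range (2 ^ n)).map (2 ^ n + ·) := by
      rw [show (2 : Nat) ^ (n + 1) = 2 ^ n + 2 ^ n by ring, List.range_add]
    simp only [pvProdFT, List.map_append, List.map_map, hsplit]
    cases i with
    | zero =>
      have hshift : n + 1 - 1 - 0 = n := by omega
      congr 1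
      · rw [List.map_congr_left (l := List.range (2 ^ n))
          (g := fun _ => false) (by
            intro r hr
            have hr' : r < 2 ^ n := List.mem_range.mp hr
            simp [Nat.shiftRight_eq_div_pow, Nat.div_eq_of_lt hr'])]
        simp [Function.comp_def, List.map_const', pvProdFT_length]
      · rw [List.map_congr_left (l := List.range (2 ^ n))
          (g := fun _ => true) (by
            intro r hr
            have hr' : r < 2 ^ n := List.mem_range.mp hr
            have : (2 ^ n + r) / 2 ^ n = 1 := by
              rw [Nat.add_div_left _ (Nat.two_pow_pos n) ]
              simp [Nat.div_eq_of_lt hr']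
            simp [Nat.shiftRight_eq_div_pow, this])]
        simp [Function.comp_def, List.map_const', pvProdFT_length]
    | succ j =>
      have hj : j < n := by omega
      have hshift : n + 1 - 1 - (j + 1) = n - 1 - j := by omega
      congr 1
      · simpa [Function.comp_def, Nat.and_one_is_mod,
          show n - (j + 1) = n - 1 - j from by omega] using ih j hj
      · rw [List.map_congr_left (l := List.range (2 ^ n))
          (g := fun r => ((r >>> (n - 1 - j)) &&& 1) == 1) (by
            intro r hr
            have hk : n - 1 - j < n := by omega
            have hpow : (2 : Nat) ^ n = 2 ^ (n - (n - 1 - j)) * 2 ^ (n - 1 - j) := by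
              rw [← pow_add]; congr 1; omega
            have hdiv : (2 ^ n + r) / 2 ^ (n - 1 - j) = 2 ^ (n - (n - 1 - j)) + r / 2 ^ (n - 1 - j) := by
              rw [hpow, Nat.add_comm (2 ^ (n - (n - 1 - j)) * 2 ^ (n - 1 - j)) r,
                Nat.add_mul_div_right _ _ (Nat.two_pow_pos _)]
              omega
            have hmod : (2 ^ (n - (n - 1 - j)) + r / 2 ^ (n - 1 - j)) % 2 =
                (r / 2 ^ (n - 1 - j)) % 2 := by
              have h1 : 1 ≤ n - (n - 1 - j) := by omega
              have : (2 : Nat) ^ (n - (n - 1 - j)) = 2 ^ (n - (n - 1 - j) - 1) * 2 := by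
                rw [← pow_succ]; congr 1; omega
              rw [this, Nat.add_comm, Nat.add_mul_mod_self_right]
            simp only [hshift, Nat.shiftRight_eq_div_pow, Nat.and_one_is_mod,
              Function.comp_apply]
            rw [hdiv, hmod])]
        simpa [Function.comp_def, Nat.and_one_is_mod,
          show n - (j + 1) = n - 1 - j from by omega] using ih j hj

-- A's booleans list is exactly the list of bit-pattern columns
theorem pvBooleans_eq (n : Nat) :
    ((pvProdFT n).foldl
      (fun bs row => (List.range row.length).foldl
        (fun bs i => bs.set i ((bs.getD i []) ++ [row.getD i false])) bs)
      (List.replicate n [])) =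
    (List.range n).map (fun i =>
      (List.range (2 ^ n)).map (fun r => ((r >>> (n - 1 - i)) &&& 1) == 1)) := by
  apply List.ext_getElem?
  intro j
  have hfold : ((pvProdFT n).foldl
      (fun bs row => (List.range row.length).foldl
        (fun bs i => bs.set i ((bs.getD i []) ++ [row.getD i false])) bs)
      (List.replicate n [])) =
      (pvProdFT n).foldl (fun bs row => pvInner row bs row.length) (List.replicate n []) := rfl
  rw [hfold]
  by_cases hj : j < n
  · rw [pvOuter_getElem? (pvProdFT n) n (pvProdFT_row_length n) _ (by simp) j hj]
    rw [pvCol_eq n j hj]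
    simp [hj]
  · have hlen : ((pvProdFT n).foldl (fun bs row => pvInner row bs row.length)
        (List.replicate n [])).length = n := by
      rw [pvOuter_length]; simp
    rw [List.getElem?_eq_none (by rw [hlen]; omega),
      List.getElem?_eq_none (by simp only [List.length_map, List.length_range]; omega)]

-- folding inserts over zip models (map g (range n)) is the indexed-insert loop of B
theorem pvZip_enum (models : List String) (g : Nat → List Bool)
    (d : PySem.Dict String (List Bool)) :
    (models.zip ((List.range models.length).map g)).foldl (fun d p => d.insert p.1 p.2) d =
      (List.range models.length).foldl (fun d i => d.insert (models.getD i "") (g i)) d := by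
  induction models generalizing g d with
  | nil => rfl
  | cons m ms ih =>
    simp only [List.length_cons, List.range_succ_eq_map, List.map_cons, List.map_map,
      List.zip_cons_cons, List.foldl_cons, List.foldl_map]
    rw [ih (g ∘ Nat.succ) (d.insert m (g 0))]
    rfl

-- ===== VERDICT (by name: the statement is the Claim_ definition above) =====
theorem build_truth_table_spec : Claim_equal_build_truth_table := by
  intro models _
  unfold Spec_build_truth_table build_truth_table build_truth_table_alt
  simp only []
  rw [pvBooleans_eq models.length, pvZip_enum]
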